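-- pv_equiv track=rewrite | github.com/evadelzz1/experiment3 | pages/80_QuizEx5.py | extract_answers
-- ===== SOURCE A (Python) =====
-- def extract_answers(test, num_questions):
--     answers = {1 : ""}
--     question_number = 1
--     for line in test.split("\n"):
--         if line.startswith("Correct Answer:"):
--             answers[question_number] += line+"\n"
--
--             if question_number < num_questions:
--                 question_number+=1
--                 answers[question_number] = ""
--     return answers
-- ===== SOURCE B (Python) =====
-- def extract_answers(test, num_questions):
--     matches = [line for line in test.split("\n") if line.startswith("Correct Answer:")]
--     last = max(1, min(len(matches) + 1, num_questions))
--     answers = {q: matches[q - 1] + "\n" for q in range(1, last)}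
--     answers[last] = "".join(m + "\n" for m in matches[last - 1:])
--     return answers
-- ===== Notes on version B (the rewrite author's own statement) =====
-- stated objective: simpler
-- what changed: A's single stateful loop (question counter + in-place dict append) is replaced by one filter pass collecting the 'Correct Answer:' lines followed by a direct index-based construction: a dict comprehension for the full buckets and one join for the final overflow bucket.
import Mathlib
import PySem

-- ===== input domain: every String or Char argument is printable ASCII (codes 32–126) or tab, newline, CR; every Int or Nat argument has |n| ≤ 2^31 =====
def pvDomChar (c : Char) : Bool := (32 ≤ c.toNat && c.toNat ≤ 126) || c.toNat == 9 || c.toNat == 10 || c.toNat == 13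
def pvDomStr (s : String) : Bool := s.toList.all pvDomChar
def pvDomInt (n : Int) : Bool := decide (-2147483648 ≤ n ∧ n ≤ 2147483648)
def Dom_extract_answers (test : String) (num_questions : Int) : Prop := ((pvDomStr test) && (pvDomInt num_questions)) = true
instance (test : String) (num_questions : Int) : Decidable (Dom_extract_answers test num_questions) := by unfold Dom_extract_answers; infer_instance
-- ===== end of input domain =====

-- B replaces A's stateful counter loop over all lines by one filter pass collecting the
-- 'Correct Answer:' lines and a direct index-based construction of the buckets (simpler decomposition).

-- ===== PORT A =====
def extract_answers (test : String) (num_questions : Int) : List (Int × String) :=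
  -- test.split("\n"): the separator "\n" is nonempty, so split? always returns some
  let lines := (PySem.Str.split? test "\n").getD []
  let st := lines.foldl
    (fun (st : PySem.Dict Int String × Int) line =>
      if PySem.Str.startswith line "Correct Answer:" then
        -- answers[question_number] += line + "\n": the key question_number is always present
        -- in the dict, so Python's d[k] += v coincides with modify (its default "" is unreachable)
        let d := st.1.modify st.2 "" (fun s => s ++ line ++ "\n")
        if st.2 < num_questions then (d.insert (st.2 + 1) "", st.2 + 1) else (d, st.2)
      else st)
    ((PySem.Dict.empty : PySem.Dict Int String).insert 1 "", 1)
  st.1.items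

-- ===== PORT B =====
def extract_answers_alt (test : String) (num_questions : Int) : List (Int × String) :=
  let hits := ((PySem.Str.split? test "\n").getD []).filter
      (fun line => PySem.Str.startswith line "Correct Answer:")
  let last := max 1 (min ((hits.length : Int) + 1) num_questions)
  -- {q: hits[q-1] + "\n" for q in range(1, last)}: for q < last we have q - 1 < hits.length,
  -- so hits[q-1] never raises and pyGetD's default "" is unreachable
  let answers := (PySem.List.pyRange 1 last 1).foldl
      (fun (d : PySem.Dict Int String) q =>
        d.insert q (PySem.List.pyGetD hits (q - 1) "" ++ "\n"))
      PySem.Dict.empty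
  let answers := answers.insert last
      (PySem.Str.join "" ((PySem.List.slice hits (some (last - 1)) none).map (fun m => m ++ "\n")))
  answers.items

-- ===== PRECONDITION & SPEC =====
def Spec_extract_answers (test : String) (num_questions : Int) (out : List (Int × String)) : Prop := out = extract_answers_alt test num_questions
instance (test : String) (num_questions : Int) (out : List (Int × String)) : Decidable (Spec_extract_answers test num_questions out) := by unfold Spec_extract_answers; infer_instance

-- ===== CLAIM (what is proved, stated in full; the proofs are below) =====
def Claim_equal_extract_answers : Prop := ∀ (test : String) (num_questions : Int), Dom_extract_answers test num_questions → Spec_extract_answers test num_questions (extract_answers test num_questions)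

-- ===== LEMMAS AND PROOFS =====

/-- Abstract state of A's loop restricted to the matching lines: current question number,
current bucket content, remaining hits; returns the bucket list it will still produce. -/
def pvCore (ms : List String) (qn : Int) (cur : String) (num : Int) : List (Int × String) :=
  match ms with
  | [] => [(qn, cur)]
  | m :: ms' =>
    if qn < num then (qn, cur ++ m ++ "\n") :: pvCore ms' (qn + 1) "" num
    else pvCore ms' qn (cur ++ m ++ "\n") num

lemma pv_join_cons (x : String) (xs : List String) :
    PySem.Str.join "" (x :: xs) = x ++ PySem.Str.join "" xs := by
  cases xs <;> simp [PySem.Str.join, PySem.Chars.join, List.intercalate, String.ofList_append]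

lemma pv_pyGetD_cons_pos {α : Type} (x : α) (xs : List α) (i : Int) (d : α) (h : 1 ≤ i) :
    PySem.List.pyGetD (x :: xs) i d = PySem.List.pyGetD xs (i - 1) d := by
  obtain ⟨n, rfl⟩ : ∃ n : Nat, i = (n : Int) := ⟨i.toNat, (Int.toNat_of_nonneg (by omega)).symm⟩
  match n with
  | 0 => omega
  | (n + 1) =>
    have h1 : ((n + 1 : Nat) : Int) - 1 = ((n : Nat) : Int) := by push_cast; omega
    rw [PySem.List.pyGetD_natCast, h1, PySem.List.pyGetD_natCast, List.getD_cons_succ]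

lemma pv_get?_mk_append_last (pre : List (Int × String)) (qn : Int) (cur : String)
    (h : ∀ p ∈ pre, p.1 ≠ qn) :
    (PySem.Dict.mk (pre ++ [(qn, cur)]) : PySem.Dict Int String).get? qn = some cur := by
  induction pre with
  | nil => simp [PySem.Dict.get?_mk_cons]
  | cons p pre ih =>
    rw [List.cons_append, PySem.Dict.get?_mk_cons]
    have hp : p.1 ≠ qn := h p (by simp)
    simp only [beq_iff_eq, if_neg hp]
    exact ih (fun q hq => h q (by simp [hq]))

lemma pv_modify_mk_append_last (pre : List (Int × String)) (qn : Int) (cur : String)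
    (f : String → String) (h : ∀ p ∈ pre, p.1 ≠ qn) :
    (PySem.Dict.mk (pre ++ [(qn, cur)]) : PySem.Dict Int String).modify qn "" f
      = PySem.Dict.mk (pre ++ [(qn, f cur)]) := by
  have hget : (PySem.Dict.mk (pre ++ [(qn, cur)]) : PySem.Dict Int String).getD qn "" = cur := by
    rw [PySem.Dict.getD_eq_get?_getD, pv_get?_mk_append_last pre qn cur h]; rfl
  have hcont : (PySem.Dict.mk (pre ++ [(qn, cur)]) : PySem.Dict Int String).contains qn = true := by
    simp [PySem.Dict.contains]
  rw [PySem.Dict.modify, hget, PySem.Dict.insert, if_pos hcont]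
  apply PySem.Dict.ext
  have hpre : pre.map (fun p => if (p.1 == qn) = true then (qn, f cur) else p) = pre := by
    conv_rhs => rw [← List.map_id pre]
    exact List.map_congr_left (fun p hp => by simp [h p hp])
  simp only [List.map_append, List.map_cons, List.map_nil, beq_self_eq_true, if_true, hpre]

lemma pv_insert_fresh (d : PySem.Dict Int String) (k : Int) (v : String)
    (h : d.contains k = false) : d.insert k v = PySem.Dict.mk (d.items ++ [(k, v)]) := by
  apply PySem.Dict.ext
  rw [PySem.Dict.items_insert_of_not_contains d v h]

/-- A's loop over the matching lines, started on a dict `pre ++ [(qn, cur)]` whose earlier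
keys are all below `qn`, appends `pvCore` of what remains. -/
lemma pv_loopA (num : Int) (ms : List String) :
    ∀ (pre : List (Int × String)) (qn : Int) (cur : String), (∀ p ∈ pre, p.1 < qn) →
    (ms.foldl
      (fun (st : PySem.Dict Int String × Int) line =>
        let d := st.1.modify st.2 "" (fun s => s ++ line ++ "\n")
        if st.2 < num then (d.insert (st.2 + 1) "", st.2 + 1) else (d, st.2))
      (PySem.Dict.mk (pre ++ [(qn, cur)]), qn)).1.items
      = pre ++ pvCore ms qn cur num := by
  induction ms with
  | nil => intro pre qn cur _; simp [pvCore]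
  | cons m ms ih =>
    intro pre qn cur hpre
    rw [List.foldl_cons]
    have hmod := pv_modify_mk_append_last pre qn cur (fun s => s ++ m ++ "\n")
      (fun p hp => by have := hpre p hp; omega)
    by_cases hlt : qn < num
    · have hfresh : (PySem.Dict.mk (pre ++ [(qn, cur ++ m ++ "\n")]) :
          PySem.Dict Int String).contains (qn + 1) = false := by
        simp only [PySem.Dict.contains, List.any_eq_false, List.mem_append, List.mem_singleton]
        rintro p (hp | rfl)
        · have := hpre p hp; simp; omega
        · simp
      simp only [hmod, if_pos hlt, pv_insert_fresh _ _ _ hfresh]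
      have := ih (pre ++ [(qn, cur ++ m ++ "\n")]) (qn + 1) ""
        (by
          intro p hp
          rcases List.mem_append.1 hp with hp | hp
          · have := hpre p hp; omega
          · simp only [List.mem_singleton] at hp; subst hp; omega)
      rw [List.append_assoc] at this
      simp only [List.append_assoc] at this ⊢
      rw [this, pvCore, if_pos hlt]
      simp
    · simp only [hmod, if_neg hlt]
      rw [ih pre qn (cur ++ m ++ "\n") hpre, pvCore, if_neg hlt]

/-- Tail phase: once `qn` can no longer advance, everything is appended to bucket `qn`. -/
lemma pv_core_tail (num : Int) (ms : List String) :
    ∀ (qn : Int) (cur : String), ¬ qn < num →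
    pvCore ms qn cur num = [(qn, cur ++ PySem.Str.join "" (ms.map (fun m => m ++ "\n")))] := by
  induction ms with
  | nil => intro qn cur _; simp [pvCore, PySem.Str.join, PySem.Chars.join, List.intercalate]
  | cons m ms ih =>
    intro qn cur h
    rw [pvCore, if_neg h, ih qn _ h, List.map_cons, pv_join_cons]
    simp [String.append_assoc]

/-- Closed form of `pvCore` from an empty current bucket: the shape B builds. -/
lemma pv_core_closed (num : Int) (ms : List String) :
    ∀ qn : Int,
    pvCore ms qn "" num =
      (PySem.List.pyRange qn (max qn (min (qn + ms.length) num)) 1).map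
        (fun q => (q, PySem.List.pyGetD ms (q - qn) "" ++ "\n"))
      ++ [(max qn (min (qn + ms.length) num),
           PySem.Str.join ""
             ((PySem.List.slice ms (some (max qn (min (qn + ms.length) num) - qn)) none).map
               (fun m => m ++ "\n")))] := by
  induction ms with
  | nil =>
    intro qn
    have hL : max qn (min (qn + (([] : List String).length : Int)) num) = qn := by
      simp only [List.length_nil, Nat.cast_zero, add_zero]
      omega
    rw [hL, pvCore, PySem.List.pyRange_one_eq_nil (le_refl qn),
      PySem.List.slice_from _ (by omega : (0:Int) ≤ qn - qn)]
    simp [PySem.Str.join, PySem.Chars.join, List.intercalate]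
  | cons m ms ih =>
    intro qn
    by_cases hlt : qn < num
    · have hlen : ((m :: ms).length : Int) = (ms.length : Int) + 1 := by simp
      have hL : max qn (min (qn + ((m :: ms).length : Int)) num)
          = max (qn + 1) (min ((qn + 1) + (ms.length : Int)) num) := by
        simp only [List.length_cons]; push_cast; omega
      have hge : qn + 1 ≤ max (qn + 1) (min ((qn + 1) + (ms.length : Int)) num) := le_max_left _ _
      rw [pvCore, if_pos hlt, ih (qn + 1), hL,
        PySem.List.pyRange_one_cons (a := qn)
          (b := max (qn + 1) (min ((qn + 1) + (ms.length : Int)) num)) (by omega),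
        List.map_cons]
      congr 1
      · simp
      congr 1
      · refine List.map_congr_left (fun q hq => ?_)
        rw [PySem.List.mem_pyRange_one] at hq
        rw [pv_pyGetD_cons_pos m ms (q - qn) "" (by omega),
          show q - qn - 1 = q - (qn + 1) from by omega]
      · congr 2
        rw [PySem.List.slice_from _ (by omega : (0:Int) ≤ max (qn + 1) (min ((qn + 1) + (ms.length : Int)) num) - qn),
          PySem.List.slice_from _ (by omega : (0:Int) ≤ max (qn + 1) (min ((qn + 1) + (ms.length : Int)) num) - (qn + 1))]
        have h1 : (max (qn + 1) (min ((qn + 1) + (ms.length : Int)) num) - qn).toNat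
            = (max (qn + 1) (min ((qn + 1) + (ms.length : Int)) num) - (qn + 1)).toNat + 1 := by
          omega
        rw [h1, List.drop_succ_cons]
    · have hL : max qn (min (qn + ((m :: ms).length : Int)) num) = qn := by
        simp only [List.length_cons]; push_cast; omega
      rw [hL, pv_core_tail num (m :: ms) qn "" hlt,
        PySem.List.pyRange_one_eq_nil (le_refl qn), List.map_nil, List.nil_append,
        PySem.List.slice_from _ (by omega : (0:Int) ≤ qn - qn)]
      simp

-- ===== VERDICT (by name: the statement is the Claim_ definition above) =====
theorem extract_answers_spec : Claim_equal_extract_answers := by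
  intro test num _
  unfold Spec_extract_answers extract_answers extract_answers_alt
  simp only []
  set lines := (PySem.Str.split? test "\n").getD [] with hlines
  set p := fun line => PySem.Str.startswith line "Correct Answer:" with hp
  set ms := lines.filter p with hms
  -- A's guarded loop over all lines = the unguarded loop over the matching lines
  have hA : (lines.foldl
      (fun (st : PySem.Dict Int String × Int) line =>
        if p line then
          let d := st.1.modify st.2 "" (fun s => s ++ line ++ "\n")
          if st.2 < num then (d.insert (st.2 + 1) "", st.2 + 1) else (d, st.2)
        else st)
      ((PySem.Dict.empty : PySem.Dict Int String).insert 1 "", 1)).1.items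
      = pvCore ms 1 "" num := by
    rw [← List.foldl_filter, ← hms]
    have hinit : ((PySem.Dict.empty : PySem.Dict Int String).insert 1 "")
        = PySem.Dict.mk ([] ++ [((1 : Int), "")]) := by decide
    rw [hinit]
    exact pv_loopA num ms [] 1 "" (by simp)
  rw [hA, pv_core_closed num ms 1]
  -- B's dict construction, at the items level
  have hfresh : ∀ a ∈ PySem.List.pyRange 1 (max 1 (min ((ms.length : Int) + 1) num)) 1,
      (PySem.Dict.empty : PySem.Dict Int String).contains a = false := by
    intro a _; simp [PySem.Dict.contains, PySem.Dict.empty]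
  have hndp : ((PySem.List.pyRange 1 (max 1 (min ((ms.length : Int) + 1) num)) 1).map
      (fun q => q)).Nodup := by
    simpa using PySem.List.nodup_pyRange_one 1 (max 1 (min ((ms.length : Int) + 1) num))
  have hB := PySem.Dict.items_foldl_insert_fresh
      (PySem.List.pyRange 1 (max 1 (min ((ms.length : Int) + 1) num)) 1)
      (fun q => q) (fun q => PySem.List.pyGetD ms (q - 1) "" ++ "\n")
      (PySem.Dict.empty : PySem.Dict Int String) hfresh hndp
  have hcontB : (((PySem.List.pyRange 1 (max 1 (min ((ms.length : Int) + 1) num)) 1).foldl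
      (fun (d : PySem.Dict Int String) q =>
        d.insert q (PySem.List.pyGetD ms (q - 1) "" ++ "\n")) PySem.Dict.empty)).contains
      (max 1 (min ((ms.length : Int) + 1) num)) = false := by
    simp only [PySem.Dict.contains, hB, List.any_eq_false]
    rintro x hx
    simp only [PySem.Dict.empty, List.nil_append, List.mem_map] at hx
    obtain ⟨q, hq, rfl⟩ := hx
    rw [PySem.List.mem_pyRange_one] at hq
    simp; omega
  rw [pv_insert_fresh _ _ _ hcontB]
  have hB2 : ((PySem.List.pyRange 1 (max 1 (min ((ms.length : Int) + 1) num)) 1).foldl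
      (fun (d : PySem.Dict Int String) q =>
        d.insert q (PySem.List.pyGetD ms (q - 1) "" ++ "\n")) PySem.Dict.empty).items
      = (PySem.List.pyRange 1 (max 1 (min ((ms.length : Int) + 1) num)) 1).map
          (fun q => (q, PySem.List.pyGetD ms (q - 1) "" ++ "\n")) := by
    simpa using hB
  have harith : max 1 (min ((1 : Int) + (ms.length : Int)) num)
      = max 1 (min ((ms.length : Int) + 1) num) := by omega
  rw [harith, hB2]
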